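-- pv_equiv track=rewrite | github.com/nickojelly/grvmodel | Python/pytorch/New Model/LSTM/training_testing_gru.py | batch_indexer
-- ===== SOURCE A (Python) =====
-- def batch_indexer(batch_size,group_len, dataset_len):
--     num_batches = group_len
--     group_size = batch_size*group_len
--     all_batches = []
--     for n in range(num_batches):
--         batch = []
--
--         for i in range(dataset_len):
--             if batch_size*(n)<i%group_size<batch_size*(n+1):
--                 batch.append(i)
--
--         all_batches.append(batch)
--     return all_batches
-- ===== SOURCE B (Python) =====
-- def batch_indexer(batch_size, group_len, dataset_len):
--     # One pass: assign each index to its batch by division, instead of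
--     # re-scanning the whole dataset once per batch.
--     buckets = [[] for _ in range(group_len)]
--     if batch_size > 0 and group_len > 0:
--         group_size = batch_size * group_len
--         for i in range(dataset_len):
--             r = i % group_size
--             if r % batch_size != 0:
--                 buckets[r // batch_size].append(i)
--     return buckets
-- ===== Notes on version B (the rewrite author's own statement) =====
-- stated objective: faster
-- what changed: B makes a single pass over the dataset and assigns each index directly to its batch via r//batch_size (skipping indices with r%batch_size==0), instead of A's rescan of the whole dataset once per batch.
import Mathlib
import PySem

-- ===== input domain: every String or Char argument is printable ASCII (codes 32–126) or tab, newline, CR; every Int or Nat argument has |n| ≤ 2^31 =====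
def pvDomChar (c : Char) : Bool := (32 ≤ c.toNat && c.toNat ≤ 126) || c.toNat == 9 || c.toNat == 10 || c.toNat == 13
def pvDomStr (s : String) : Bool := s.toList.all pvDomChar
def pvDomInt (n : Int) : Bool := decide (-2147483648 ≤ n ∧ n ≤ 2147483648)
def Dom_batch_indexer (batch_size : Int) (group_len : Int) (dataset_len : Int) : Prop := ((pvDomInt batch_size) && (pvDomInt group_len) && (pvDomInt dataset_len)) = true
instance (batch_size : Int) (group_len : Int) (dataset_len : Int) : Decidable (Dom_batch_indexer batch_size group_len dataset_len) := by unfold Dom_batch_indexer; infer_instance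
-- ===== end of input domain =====

-- B replaces A's per-batch rescans of the whole dataset by a single bucketing pass
-- (each index goes straight to batch (i % group_size) // batch_size): asymptotically faster.

-- ===== PORT A =====
def batch_indexer (batch_size : Int) (group_len : Int) (dataset_len : Int) : List (List Int) :=
  let num_batches := group_len
  let group_size := batch_size * group_len
  let all_batches : List (List Int) := []
  (PySem.List.pyRange 0 num_batches 1).foldl (fun all_batches n =>
    let batch : List Int := []
    let batch := (PySem.List.pyRange 0 dataset_len 1).foldl (fun batch i =>
      if batch_size * n < PySem.Int.mod i group_size ∧ PySem.Int.mod i group_size < batch_size * (n + 1)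
      then batch ++ [i] else batch) batch
    all_batches ++ [batch]) all_batches

-- ===== PORT B =====
def batch_indexer_alt (batch_size : Int) (group_len : Int) (dataset_len : Int) : List (List Int) :=
  let buckets : List (List Int) := (PySem.List.pyRange 0 group_len 1).map (fun _ => [])
  if 0 < batch_size ∧ 0 < group_len then
    let group_size := batch_size * group_len
    (PySem.List.pyRange 0 dataset_len 1).foldl (fun buckets i =>
      let r := PySem.Int.mod i group_size
      if PySem.Int.mod r batch_size ≠ 0 then
        -- buckets[r // batch_size].append(i): inside this guard 0 ≤ r // batch_size < group_len,
        -- so Python's (nonnegative) index is exactly this Nat index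
        buckets.modify (PySem.Int.floordiv r batch_size).toNat (· ++ [i])
      else buckets) buckets
  else buckets

-- ===== PRECONDITION & SPEC =====
-- Pre_ excludes exactly the inputs on which Python A raises ZeroDivisionError (i % 0).
def Pre_batch_indexer (batch_size : Int) (group_len : Int) (dataset_len : Int) : Prop :=
  ¬ (batch_size = 0 ∧ 0 < group_len ∧ 0 < dataset_len)
instance (batch_size : Int) (group_len : Int) (dataset_len : Int) : Decidable (Pre_batch_indexer batch_size group_len dataset_len) := by unfold Pre_batch_indexer; infer_instance
def pvWitness_batch_indexer : Int × Int × Int := (2, 3, 14)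

def Spec_batch_indexer (batch_size : Int) (group_len : Int) (dataset_len : Int) (out : List (List Int)) : Prop := out = batch_indexer_alt batch_size group_len dataset_len
instance (batch_size : Int) (group_len : Int) (dataset_len : Int) (out : List (List Int)) : Decidable (Spec_batch_indexer batch_size group_len dataset_len out) := by unfold Spec_batch_indexer; infer_instance

-- ===== CLAIM (what is proved, stated in full; the proofs are below) =====
def Claim_equal_batch_indexer : Prop := ∀ (batch_size : Int) (group_len : Int) (dataset_len : Int), Dom_batch_indexer batch_size group_len dataset_len → Pre_batch_indexer batch_size group_len dataset_len → Spec_batch_indexer batch_size group_len dataset_len (batch_indexer batch_size group_len dataset_len)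

-- ===== LEMMAS AND PROOFS =====

-- A's loops, as map/filter.
lemma bi_A_shape (bs gl dl : Int) :
    batch_indexer bs gl dl = (PySem.List.pyRange 0 gl 1).map (fun n =>
      (PySem.List.pyRange 0 dl 1).filter (fun i =>
        decide (bs * n < PySem.Int.mod i (bs * gl) ∧ PySem.Int.mod i (bs * gl) < bs * (n + 1)))) := by
  simp only [batch_indexer, PySem.List.foldl_append_ite_eq_filter,
    PySem.List.foldl_append_singleton_eq_map, List.nil_append]

-- A's membership test is always false when batch_size ≤ 0.
lemma bi_pred_false_of_nonpos (bs gl n i : Int) (hbs : bs ≤ 0) :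
    ¬ (bs * n < PySem.Int.mod i (bs * gl) ∧ PySem.Int.mod i (bs * gl) < bs * (n + 1)) := by
  rintro ⟨h1, h2⟩
  have : bs * (n + 1) = bs * n + bs := by ring
  nlinarith

-- modifying one cell of a map-over-range is a map with the function updated there
lemma bi_modify_map_range (m k : Nat) (g : Nat → List Int) (x : Int) :
    ((List.range m).map g).modify k (· ++ [x]) =
      (List.range m).map (fun n => if n = k then g n ++ [x] else g n) := by
  apply List.ext_getElem
  · simp
  · intro j h1 h2
    simp only [List.getElem_modify, List.getElem_map, List.getElem_range]
    rcases eq_or_ne k j with h | h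
    · simp [h]
    · simp [h, Ne.symm h]

-- B's loop invariant: the buckets stay a map over range, each bucket collecting its filter.
lemma bi_B_invariant (bs gl : Int) (L : List Int) (g : Nat → List Int) :
    L.foldl (fun buckets i =>
      let r := PySem.Int.mod i (bs * gl)
      if PySem.Int.mod r bs ≠ 0 then
        buckets.modify (PySem.Int.floordiv r bs).toNat (· ++ [i])
      else buckets) ((List.range gl.toNat).map g) =
    (List.range gl.toNat).map (fun n => g n ++ L.filter (fun i =>
      decide (PySem.Int.mod (PySem.Int.mod i (bs * gl)) bs ≠ 0 ∧
        (PySem.Int.floordiv (PySem.Int.mod i (bs * gl)) bs).toNat = n))) := by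
  induction L generalizing g with
  | nil => simp
  | cons i L ih =>
    simp only [List.foldl_cons]
    by_cases hz : PySem.Int.mod (PySem.Int.mod i (bs * gl)) bs ≠ 0
    · rw [if_pos hz, bi_modify_map_range _ _ _ _, ih]
      apply List.map_congr_left
      intro n hn
      by_cases hnk : n = (PySem.Int.floordiv (PySem.Int.mod i (bs * gl)) bs).toNat
      · simp [hnk, hz, List.append_assoc]
      · simp [hnk, hz, Ne.symm hnk]
    · rw [if_neg hz, ih]
      apply List.map_congr_left
      intro n hn
      simp [hz]

-- A's window test and B's bucket assignment agree for every index.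
lemma bi_pred_iff (bs gl i : Int) (n : Nat) (hbs : 0 < bs) (hgl : 0 < gl) :
    (bs * (n : Int) < PySem.Int.mod i (bs * gl) ∧
      PySem.Int.mod i (bs * gl) < bs * ((n : Int) + 1)) ↔
    (PySem.Int.mod (PySem.Int.mod i (bs * gl)) bs ≠ 0 ∧
      (PySem.Int.floordiv (PySem.Int.mod i (bs * gl)) bs).toNat = n) := by
  have hgs : 0 < bs * gl := mul_pos hbs hgl
  set r := PySem.Int.mod i (bs * gl) with hrdef
  have hr0 : 0 ≤ r := PySem.Int.mod_nonneg _ hgs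
  have hs0 : 0 ≤ PySem.Int.mod r bs := PySem.Int.mod_nonneg _ hbs
  have hslt : PySem.Int.mod r bs < bs := PySem.Int.mod_lt _ hbs
  have heq : PySem.Int.floordiv r bs * bs + PySem.Int.mod r bs = r :=
    PySem.Int.floordiv_mul_add_mod r bs
  have hq0 : 0 ≤ PySem.Int.floordiv r bs := by
    rw [PySem.Int.floordiv_eq_ediv_of_pos hbs]; exact Int.ediv_nonneg hr0 (le_of_lt hbs)
  constructor
  · rintro ⟨h1, h2⟩
    have hqn : PySem.Int.floordiv r bs = (n : Int) := by
      rw [PySem.Int.floordiv_eq_iff_of_pos hbs]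
      constructor <;> nlinarith
    refine ⟨?_, by omega⟩
    intro hz
    rw [hz, add_zero, hqn] at heq
    nlinarith
  · rintro ⟨hz, hn⟩
    have hqn : PySem.Int.floordiv r bs = (n : Int) := by omega
    rw [hqn] at heq
    have hspos : 0 < PySem.Int.mod r bs := lt_of_le_of_ne hs0 (Ne.symm hz)
    have hc1 : bs * (n : Int) = (n : Int) * bs := by ring
    have hc2 : bs * ((n : Int) + 1) = (n : Int) * bs + bs := by ring
    constructor <;> linarith
-- ===== VERDICT (by name: the statement is the Claim_ definition above) =====
theorem batch_indexer_spec : Claim_equal_batch_indexer := by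
  intro bs gl dl _ _
  unfold Spec_batch_indexer
  by_cases hgl : gl ≤ 0
  · -- group_len ≤ 0: both sides are []
    have hnot : ¬ (0 < bs ∧ 0 < gl) := by omega
    rw [bi_A_shape, PySem.List.pyRange_one_eq_nil hgl]
    simp [batch_indexer_alt, PySem.List.pyRange_one_eq_nil hgl, hnot]
  have hgl : 0 < gl := by omega
  by_cases hbs : bs ≤ 0
  · -- batch_size ≤ 0: every batch is empty on both sides
    rw [bi_A_shape]
    have hB : batch_indexer_alt bs gl dl = (PySem.List.pyRange 0 gl 1).map (fun _ => []) := by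
      simp only [batch_indexer_alt]
      rw [if_neg (by omega)]
    rw [hB]
    apply List.map_congr_left
    intro n _
    rw [List.filter_eq_nil_iff]
    intro i _
    simpa using bi_pred_false_of_nonpos bs gl n i hbs
  · -- main case: 0 < batch_size, 0 < group_len
    have hbs : 0 < bs := by omega
    rw [bi_A_shape]
    have hB : batch_indexer_alt bs gl dl =
        (List.range gl.toNat).map (fun n => ([] : List Int) ++
          (PySem.List.pyRange 0 dl 1).filter (fun i =>
            decide (PySem.Int.mod (PySem.Int.mod i (bs * gl)) bs ≠ 0 ∧
              (PySem.Int.floordiv (PySem.Int.mod i (bs * gl)) bs).toNat = n))) := by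
      simp only [batch_indexer_alt]
      rw [if_pos ⟨hbs, hgl⟩, PySem.List.pyRange_zero gl, List.map_map]
      exact bi_B_invariant bs gl _ _
    rw [hB, PySem.List.pyRange_zero gl, List.map_map]
    apply List.map_congr_left
    intro n _
    simp only [Function.comp_apply, List.nil_append]
    apply List.filter_congr
    intro i _
    simp only [decide_eq_decide]
    exact bi_pred_iff bs gl i n hbs hgl
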